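-- pv_equiv track=rewrite | github.com/Apiantsiak/snippets_and_practice | subnet_modules.py | decimal
-- ===== SOURCE A (Python) =====
-- def decimal(val: str) -> str:
--     """Convert binary to decimal
--     :param: str
--     :return: str
--     """
--
--     ls_vals = val.split(".")
--     decimal_vals = []
--
--     for val in ls_vals:
--         decimal_numb = 0
--         for pos, char in enumerate(reversed(val)):
--             if int(char):
--                 decimal_numb += 2 ** pos
--         decimal_vals.append(str(decimal_numb))
--     decimal_val = ".".join(decimal_vals)
--
--     return decimal_val
-- ===== SOURCE B (Python) =====
-- def decimal(val: str) -> str: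
--     """Convert binary to decimal
--     :param: str
--     :return: str
--     """
--     out = []
--     num = 0
--     for ch in val:
--         if ch == '.':
--             out.append(str(num))
--             num = 0
--         else:
--             num = num * 2 + (1 if int(ch) else 0)
--     out.append(str(num))
--     return ".".join(out)
-- ===== Notes on version B (the rewrite author's own statement) =====
-- stated objective: alternative
-- what changed: B makes a single left-to-right pass over the whole string with a Horner accumulator (num = num*2 + bit) that is flushed at each dot, instead of A's split-into-octets then enumerate-reversed-and-sum-2**pos per octet.
import Mathlib
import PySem

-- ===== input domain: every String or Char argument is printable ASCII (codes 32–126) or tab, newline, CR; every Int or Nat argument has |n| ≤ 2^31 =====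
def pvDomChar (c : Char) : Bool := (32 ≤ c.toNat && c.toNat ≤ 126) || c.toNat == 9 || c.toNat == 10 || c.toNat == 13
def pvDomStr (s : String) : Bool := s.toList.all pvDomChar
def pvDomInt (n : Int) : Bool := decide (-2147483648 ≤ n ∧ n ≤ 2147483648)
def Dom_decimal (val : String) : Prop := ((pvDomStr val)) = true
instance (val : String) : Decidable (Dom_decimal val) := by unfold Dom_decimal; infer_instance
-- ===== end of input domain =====

-- B makes a single left-to-right pass with a Horner accumulator flushed at each dot,
-- instead of A's split-then-enumerate-reversed-sum-of-2**pos per octet (objective: alternative).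


-- ===== PORT A =====
-- int(char): PySem.Int.ofChars? [c]; it is none exactly where Python raises ValueError,
-- which Pre_decimal excludes, so the port reads it with getD 0 there.
def decAOctet (cs : List Char) : Int :=
  (PySem.List.enumerate cs.reverse).foldl
    (fun acc pc => if (PySem.Int.ofChars? [pc.2]).getD 0 ≠ 0 then acc + 2 ^ pc.1.toNat else acc) 0

def decimal (val : String) : String :=
  String.ofList (PySem.Chars.join ['.']
    ((PySem.Chars.splitOn val.toList ['.']).foldl
      (fun acc v => acc ++ [PySem.Int.toChars (decAOctet v)]) []))

-- ===== PORT B =====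
-- single pass; state = (out : list of rendered numbers, num : Horner accumulator)
def decBStep (st : List (List Char) × Int) (c : Char) : List (List Char) × Int :=
  if c = '.' then (st.1 ++ [PySem.Int.toChars st.2], 0)
  else (st.1, st.2 * 2 + (if (PySem.Int.ofChars? [c]).getD 0 ≠ 0 then 1 else 0))

def decBFinish (st : List (List Char) × Int) : List (List Char) :=
  st.1 ++ [PySem.Int.toChars st.2]

def decimal_alt (val : String) : String :=
  String.ofList (PySem.Chars.join ['.'] (decBFinish (val.toList.foldl decBStep ([], 0))))

-- ===== PRECONDITION & SPEC =====
-- Exactly where Python A returns: int(char) raises ValueError on any character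
-- that is not an ASCII decimal digit, so every non-separator character must be a digit.
def Pre_decimal (val : String) : Prop := val.toList.all (fun c => c == '.' || c.isDigit) = true
instance (val : String) : Decidable (Pre_decimal val) := by unfold Pre_decimal; infer_instance
def pvWitness_decimal : String := "1.0"

def Spec_decimal (val : String) (out : String) : Prop := out = decimal_alt val
instance (val : String) (out : String) : Decidable (Spec_decimal val out) := by unfold Spec_decimal; infer_instance

-- ===== CLAIM (what is proved, stated in full; the proofs are below) =====
def Claim_equal_decimal : Prop := ∀ (val : String), Dom_decimal val → Pre_decimal val → Spec_decimal val (decimal val)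

-- ===== LEMMAS AND PROOFS =====
-- bit value both programs assign to a character
def pvBit (c : Char) : Int := if (PySem.Int.ofChars? [c]).getD 0 ≠ 0 then 1 else 0

-- Σ pvBit r[i] * 2^i, little-endian value of a bit string
def pvVal (r : List Char) : Int := r.foldr (fun c n => pvBit c + 2 * n) 0

-- Horner accumulation as B does it
def pvHorner (a : Int) (cs : List Char) : Int :=
  cs.foldl (fun num c => num * 2 + pvBit c) a

-- simple structural splitter on '.'
def pvSp : List Char → List (List Char)
  | [] => [[]]
  | c :: cs =>
    match pvSp cs with
    | [] => []
    | p :: ps => if c = '.' then [] :: p :: ps else (c :: p) :: ps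

theorem pvSp_ne_nil (l : List Char) : pvSp l ≠ [] := by
  induction l with
  | nil => simp [pvSp]
  | cons c cs ih =>
    simp only [pvSp]
    cases h : pvSp cs with
    | nil => exact absurd h ih
    | cons p ps => split <;> first | (split <;> simp) | simp_all

theorem decA_enum (r : List Char) (s : Nat) (acc : Int) :
    (PySem.List.enumerate r (s : Int)).foldl
      (fun acc pc => if (PySem.Int.ofChars? [pc.2]).getD 0 ≠ 0 then acc + 2 ^ pc.1.toNat else acc) acc
      = acc + 2 ^ s * pvVal r := by
  induction r generalizing s acc with
  | nil => simp [PySem.List.enumerate, pvVal]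
  | cons c r ih =>
    rw [PySem.List.enumerate_cons]
    have hcast : (s : Int) + 1 = ((s + 1 : Nat) : Int) := by push_cast; ring
    simp only [List.foldl_cons, hcast, ih, pvVal, List.foldr_cons]
    by_cases h : (PySem.Int.ofChars? [c]).getD 0 ≠ 0 <;>
      simp only [h, pvBit, Int.toNat_natCast] <;>
      simp [h] <;> ring

theorem pvVal_append (r : List Char) (c : Char) :
    pvVal (r ++ [c]) = pvVal r + pvBit c * 2 ^ r.length := by
  induction r with
  | nil => simp [pvVal]
  | cons d r ih =>
    simp only [pvVal, List.cons_append, List.foldr_cons, List.length_cons] at ih ⊢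
    rw [ih]; ring

theorem pvHorner_eq (cs : List Char) (a : Int) :
    pvHorner a cs = a * 2 ^ cs.length + pvVal cs.reverse := by
  induction cs generalizing a with
  | nil => simp [pvHorner, pvVal]
  | cons c cs ih =>
    simp only [pvHorner, List.foldl_cons] at ih ⊢
    rw [ih]
    simp only [List.reverse_cons, pvVal_append, List.length_reverse, List.length_cons]
    ring

theorem octet_eq (cs : List Char) : decAOctet cs = pvHorner 0 cs := by
  unfold decAOctet
  rw [pvHorner_eq]
  have h := decA_enum cs.reverse 0 0
  simp only [Nat.cast_zero, pow_zero, one_mul, zero_add, zero_mul] at h ⊢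
  exact h

-- characterize PySem.Chars.splitOn.go on the single-char separator '.'
theorem splitOn_go_eq (l : List Char) (fuel : Nat) (cur : List Char)
    (acc : List (List Char)) (h : l.length < fuel) :
    PySem.Chars.splitOn.go ['.'] fuel l cur acc =
      acc.reverse ++ (match pvSp l with
        | [] => []
        | p :: ps => (cur.reverse ++ p) :: ps) := by
  induction l generalizing fuel cur acc with
  | nil =>
    cases fuel with
    | zero => omega
    | succ f => simp [PySem.Chars.splitOn.go, pvSp]
  | cons c cs ih =>
    cases fuel with
    | zero => omega
    | succ f =>
      rw [PySem.Chars.splitOn.go]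
      by_cases hc : c = '.'
      · have hpre : (['.'] : List Char).isPrefixOf (c :: cs) = true := by
          simp [List.isPrefixOf, hc]
        rw [if_pos hpre]
        simp only [List.length_singleton, List.drop_succ_cons, List.drop_zero]
        rw [ih f [] (cur.reverse :: acc) (by simpa using Nat.lt_of_succ_lt_succ h)]
        cases hsp : pvSp cs with
        | nil => exact absurd hsp (pvSp_ne_nil cs)
        | cons p ps => simp [pvSp, hsp, hc]
      · have hpre : (['.'] : List Char).isPrefixOf (c :: cs) = false := by
          simp [List.isPrefixOf]
          intro h'; exact absurd h'.symm hc
        rw [if_neg (by simp [hpre])]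
        rw [ih f (c :: cur) acc (by simpa using Nat.lt_of_succ_lt_succ h)]
        cases hsp : pvSp cs with
        | nil => exact absurd hsp (pvSp_ne_nil cs)
        | cons p ps => simp [pvSp, hsp, hc]

theorem splitOn_eq_pvSp (l : List Char) :
    PySem.Chars.splitOn l ['.'] = pvSp l := by
  unfold PySem.Chars.splitOn
  rw [splitOn_go_eq l (l.length + 1) [] [] (by omega)]
  cases hsp : pvSp l with
  | nil => exact absurd hsp (pvSp_ne_nil l)
  | cons p ps => simp

-- A's append-accumulator fold is a map
theorem foldl_app_map (parts : List (List Char)) (acc : List (List Char)) :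
    parts.foldl (fun a v => a ++ [PySem.Int.toChars (decAOctet v)]) acc
      = acc ++ parts.map (fun v => PySem.Int.toChars (decAOctet v)) := by
  induction parts generalizing acc with
  | nil => simp
  | cons p ps ih => simp [ih]

-- B's single pass produces exactly the rendered parts of pvSp
theorem decB_pass (l : List Char) (out : List (List Char)) (num : Int) :
    decBFinish (l.foldl decBStep (out, num))
      = out ++ (match pvSp l with
        | [] => []
        | p :: ps => PySem.Int.toChars (pvHorner num p)
            :: ps.map (fun v => PySem.Int.toChars (pvHorner 0 v))) := by
  induction l generalizing out num with
  | nil => simp [pvSp, pvHorner, decBFinish]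
  | cons c cs ih =>
    simp only [List.foldl_cons]
    by_cases hc : c = '.'
    · rw [show decBStep (out, num) c = (out ++ [PySem.Int.toChars num], 0) by
        simp [decBStep, hc]]
      rw [ih]
      cases hsp : pvSp cs with
      | nil => exact absurd hsp (pvSp_ne_nil cs)
      | cons p ps => simp [pvSp, hsp, hc, pvHorner]
    · rw [show decBStep (out, num) c = (out, num * 2 + pvBit c) by
        simp [decBStep, hc, pvBit]]
      rw [ih]
      cases hsp : pvSp cs with
      | nil => exact absurd hsp (pvSp_ne_nil cs)
      | cons p ps => simp [pvSp, hsp, hc, pvHorner]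

theorem decimal_eq (val : String) : decimal val = decimal_alt val := by
  unfold decimal decimal_alt
  rw [foldl_app_map, splitOn_eq_pvSp, decB_pass]
  cases hsp : pvSp val.toList with
  | nil => exact absurd hsp (pvSp_ne_nil val.toList)
  | cons p ps => simp [octet_eq]

-- ===== VERDICT (by name: the statement is the Claim_ definition above) =====
theorem decimal_spec : Claim_equal_decimal := by
  intro val _ _
  unfold Spec_decimal
  exact decimal_eq val
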